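-- pv_equiv track=rewrite | github.com/zaid0bustami/CM122 | proj3/proj3a.py | Spectrum
-- ===== SOURCE A (Python) =====
-- def Spectrum(counts, c1, c2):
--     result = []
--     i = 0
--     for kmer in counts:
--         count = counts[kmer]
--         if count <= c1:
--             repeat = 0
--         elif count <= c2:
--             repeat = 1
--         else:
--             repeat = 2
--         for j in range(repeat):
--             add = ('>read_' + str(i), kmer)
--             result.append(add)
--             i += 1
--     return(result)
-- ===== SOURCE B (Python) =====
-- def Spectrum(counts, c1, c2):
--     # Divide and conquer: split the items in half recursively; the left half's
--     # reads are numbered from `start`, the right half's continue after them.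
--     def rep(c):
--         return 0 if c <= c1 else (1 if c <= c2 else 2)
--     def go(items, start):
--         if len(items) == 0:
--             return []
--         if len(items) == 1:
--             kmer, c = items[0]
--             return [('>read_' + str(start + j), kmer) for j in range(rep(c))]
--         mid = len(items) // 2
--         left = go(items[:mid], start)
--         return left + go(items[mid:], start + len(left))
--     return go(list(counts.items()), 0)
-- ===== Notes on version B (the rewrite author's own statement) =====
-- stated objective: alternative
-- what changed: Replaces A's single forward loop that threads a mutable running read index through a nested range(repeat) loop with a divide-and-conquer recursion: the items are split in half, each half is expanded independently, and the right half's numbering is offset by the length of the left result, so no running counter is maintained.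
import Mathlib
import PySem

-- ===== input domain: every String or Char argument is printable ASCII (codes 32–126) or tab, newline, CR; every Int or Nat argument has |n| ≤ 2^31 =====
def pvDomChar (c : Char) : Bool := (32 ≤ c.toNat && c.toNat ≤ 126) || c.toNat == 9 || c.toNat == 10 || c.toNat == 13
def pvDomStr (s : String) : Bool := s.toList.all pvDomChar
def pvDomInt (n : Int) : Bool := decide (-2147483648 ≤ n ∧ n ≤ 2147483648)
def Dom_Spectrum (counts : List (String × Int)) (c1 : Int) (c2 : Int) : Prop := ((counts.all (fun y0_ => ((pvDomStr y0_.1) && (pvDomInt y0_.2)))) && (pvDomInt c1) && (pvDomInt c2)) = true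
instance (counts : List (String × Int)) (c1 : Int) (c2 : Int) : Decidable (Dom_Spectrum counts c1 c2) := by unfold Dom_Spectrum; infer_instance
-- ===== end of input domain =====

-- B replaces A's forward loop with its mutable running read index by a
-- divide-and-conquer recursion: each half is expanded independently and the right
-- half's numbering is offset by the left result's length; no running counter.

-- ===== PORT A =====
def Spectrum (counts : List (String × Int)) (c1 : Int) (c2 : Int) : List (String × String) :=
  (counts.foldl
    (fun (st : List (String × String) × Int) kv =>
      let count := kv.2
      let rpt : Int := if count ≤ c1 then 0 else if count ≤ c2 then 1 else 2
      (PySem.List.pyRange 0 rpt 1).foldl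
        (fun st _ => (st.1 ++ [((">read_" ++ PySem.Int.toStr st.2), kv.1)], st.2 + 1)) st)
    ([], 0)).1

-- ===== PORT B =====
-- rep(c) of Source B
def pvRepN (c1 c2 c : Int) : Nat := if c ≤ c1 then 0 else if c ≤ c2 then 1 else 2

-- go(items, start) of Source B: divide and conquer over the items list.
-- mid = len(items)//2 is Nat division (exact: len ≥ 0); the slices items[:mid] and
-- items[mid:] with 0 ≤ mid ≤ len are exactly List.take / List.drop.
def pvGo (c1 c2 : Int) (items : List (String × Int)) (start : Int) : List (String × String) :=
  if items.length = 0 then []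
  else if items.length = 1 then
    let kv := items.headI
    (List.range (pvRepN c1 c2 kv.2)).map
      (fun (j : Nat) => ((">read_" ++ PySem.Int.toStr (start + (j : Int))), kv.1))
  else
    let mid : Nat := items.length / 2
    let left := pvGo c1 c2 (items.take mid) start
    left ++ pvGo c1 c2 (items.drop mid) (start + (left.length : Int))
  termination_by items.length
  decreasing_by
  · simp; omega
  · simp; omega

def Spectrum_alt (counts : List (String × Int)) (c1 : Int) (c2 : Int) : List (String × String) :=
  pvGo c1 c2 counts 0

-- ===== PRECONDITION & SPEC =====
def Spec_Spectrum (counts : List (String × Int)) (c1 : Int) (c2 : Int) (out : List (String × String)) : Prop := out = Spectrum_alt counts c1 c2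
instance (counts : List (String × Int)) (c1 : Int) (c2 : Int) (out : List (String × String)) : Decidable (Spec_Spectrum counts c1 c2 out) := by unfold Spec_Spectrum; infer_instance

-- ===== CLAIM =====
def Claim_equal_Spectrum : Prop := ∀ (counts : List (String × Int)) (c1 : Int) (c2 : Int), Dom_Spectrum counts c1 c2 → Spec_Spectrum counts c1 c2 (Spectrum counts c1 c2)

-- ===== LEMMAS AND PROOFS =====

-- copies contributed by one kmer, and the labelling, used to characterise both ports
def pvRep (c1 c2 : Int) (kv : String × Int) : List String :=
  List.replicate (pvRepN c1 c2 kv.2) kv.1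

def pvLab (p : Int × String) : String × String := ((">read_" ++ PySem.Int.toStr p.1), p.2)

-- one iteration of A's outer loop appends the labelled expansion of that kmer
lemma pv_step (c1 c2 i : Int) (kv : String × Int) (acc : List (String × String)) :
    (PySem.List.pyRange 0 (if kv.2 ≤ c1 then (0:Int) else if kv.2 ≤ c2 then 1 else 2) 1).foldl
      (fun st _ => (st.1 ++ [((">read_" ++ PySem.Int.toStr st.2), kv.1)], st.2 + 1)) (acc, i)
    = (acc ++ (PySem.List.enumerate (pvRep c1 c2 kv) i).map pvLab,
       i + (pvRep c1 c2 kv).length) := by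
  unfold pvRep pvRepN
  split_ifs with h1 h2
  · simp [show PySem.List.pyRange 0 0 1 = [] from by decide, PySem.List.enumerate_nil]
  · simp [show PySem.List.pyRange 0 1 1 = [0] from by decide,
      PySem.List.enumerate_cons, PySem.List.enumerate_nil, pvLab]
  · simp [show PySem.List.pyRange 0 2 1 = [0, 1] from by decide,
      PySem.List.enumerate_cons, PySem.List.enumerate_nil, pvLab, List.append_assoc]
    omega

-- A's whole fold, characterised against the flattened expansion
lemma pv_fold (c1 c2 : Int) : ∀ (cs : List (String × Int)) (acc : List (String × String)) (i : Int),
    cs.foldl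
      (fun (st : List (String × String) × Int) kv =>
        let count := kv.2
        let rpt : Int := if count ≤ c1 then 0 else if count ≤ c2 then 1 else 2
        (PySem.List.pyRange 0 rpt 1).foldl
          (fun st _ => (st.1 ++ [((">read_" ++ PySem.Int.toStr st.2), kv.1)], st.2 + 1)) st)
      (acc, i)
    = (acc ++ (PySem.List.enumerate (cs.flatMap (pvRep c1 c2)) i).map pvLab,
       i + (cs.flatMap (pvRep c1 c2)).length) := by
  intro cs
  induction cs with
  | nil => intro acc i; simp [PySem.List.enumerate_nil]
  | cons kv cs ih =>
    intro acc i
    simp only [List.foldl_cons]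
    rw [pv_step c1 c2 i kv acc, ih]
    simp [PySem.List.enumerate_append, List.append_assoc]
    omega

-- labelled enumeration of r copies of x, in range form
lemma pv_enum_rep (x : String) : ∀ (r : Nat) (s : Int),
    (PySem.List.enumerate (List.replicate r x) s).map pvLab
    = (List.range r).map (fun (j : Nat) => ((">read_" ++ PySem.Int.toStr (s + (j : Int))), x)) := by
  intro r
  induction r with
  | zero => intro s; simp [PySem.List.enumerate_nil]
  | succ r ih =>
    intro s
    rw [List.replicate_succ, List.range_succ_eq_map]
    simp only [PySem.List.enumerate_cons, List.map_cons, List.map_map, pvLab, ih]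
    refine List.cons_eq_cons.mpr ⟨?_, ?_⟩
    · norm_num
    · apply List.map_congr_left
      intro j _
      simp only [Function.comp_apply]
      congr 3
      omega

-- B's recursion, characterised against the flattened expansion (strong induction on length)
lemma pv_go (c1 c2 : Int) : ∀ (n : Nat) (items : List (String × Int)), items.length = n →
    ∀ (start : Int),
    pvGo c1 c2 items start
    = (PySem.List.enumerate (items.flatMap (pvRep c1 c2)) start).map pvLab := by
  intro n
  induction n using Nat.strong_induction_on with
  | _ n ih =>
    intro items hlen start
    unfold pvGo
    by_cases h0 : items.length = 0
    · rw [if_pos h0, List.length_eq_zero_iff.mp h0]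
      simp [PySem.List.enumerate_nil]
    · by_cases h1 : items.length = 1
      · rw [if_neg h0, if_pos h1]
        obtain ⟨kv, rfl⟩ := List.length_eq_one_iff.mp h1
        simp only [List.flatMap_cons, List.flatMap_nil, List.append_nil, List.headI]
        rw [show pvRep c1 c2 kv = List.replicate (pvRepN c1 c2 kv.2) kv.1 from rfl, pv_enum_rep]
      · rw [if_neg h0, if_neg h1]
        have h2 : 2 ≤ items.length := by omega
        have htl : (items.take (items.length / 2)).length = items.length / 2 := by
          simp; omega
        have hdl : (items.drop (items.length / 2)).length
            = items.length - items.length / 2 := by simp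
        dsimp only
        rw [ih (items.length / 2) (by omega) (items.take (items.length / 2)) htl,
            ih (items.length - items.length / 2) (by omega)
              (items.drop (items.length / 2)) hdl]
        conv_rhs => rw [← List.take_append_drop (items.length / 2) items]
        rw [List.flatMap_append, PySem.List.enumerate_append, List.map_append]
        simp [PySem.List.length_enumerate]

-- ===== VERDICT =====
theorem Spectrum_spec : Claim_equal_Spectrum := by
  intro counts c1 c2 _
  unfold Spec_Spectrum Spectrum Spectrum_alt
  rw [pv_fold, pv_go c1 c2 counts.length counts rfl]
  simp
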